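-- pv_equiv track=rewrite | github.com/surajkandukuri/genai-portfolio-suraj | playwright_test.py | _pick_best_text
-- ===== SOURCE A (Python) =====
-- from typing import Dict, List, Optional, Tuple
--
-- _BAD_EXACT = {
--     "microsoft power bi", "power bi", "view report", "report",
--     "dashboard", "sign in", "home", "sheet", "show filters",
--     "navigating to visual", "use ctrl", "press ctrl", "press enter",
--     "skip to report", "skip to main content"
-- }
--
-- _BAD_SUBSTR = [
--     "navigating to visual", "use ctrl", "press ctrl", "keyboard shortcut",
--     "skip to report", "skip to main content", "aria-live"
-- ]
--
-- def _non_generic(txt: str) -> bool: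
--     low = (txt or "").strip().lower()
--     if not low or low in _BAD_EXACT:
--         return False
--     if any(sub in low for sub in _BAD_SUBSTR):
--         return False
--     return True
--
-- def _pick_best_text(cands: List[str]) -> Optional[str]:
--     scored = []
--     for raw in cands:
--         if not raw:
--             continue
--         t = raw.strip()
--         if not _non_generic(t):
--             continue
--         score = len(t) + (3 if " " in t else 0)
--         scored.append((score, t))
--     if not scored:
--         return None
--     scored.sort(reverse=True)
--     return scored[0][1]
-- ===== SOURCE B (Python) =====
-- from typing import Dict, List, Optional, Tuple
--
-- _BAD_EXACT = {
--     "microsoft power bi", "power bi", "view report", "report",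
--     "dashboard", "sign in", "home", "sheet", "show filters",
--     "navigating to visual", "use ctrl", "press ctrl", "press enter",
--     "skip to report", "skip to main content"
-- }
--
-- _BAD_SUBSTR = [
--     "navigating to visual", "use ctrl", "press ctrl", "keyboard shortcut",
--     "skip to report", "skip to main content", "aria-live"
-- ]
--
-- def _non_generic(txt: str) -> bool:
--     low = (txt or "").strip().lower()
--     if not low or low in _BAD_EXACT:
--         return False
--     if any(sub in low for sub in _BAD_SUBSTR):
--         return False
--     return True
--
-- def _pick_best_text(cands: List[str]) -> Optional[str]:
--     # single pass: keep a running best (score, text) tuple instead of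
--     # collecting all scored candidates and reverse-sorting them
--     best = None
--     for raw in cands:
--         if not raw:
--             continue
--         t = raw.strip()
--         if not _non_generic(t):
--             continue
--         cand = (len(t) + (3 if " " in t else 0), t)
--         if best is None or cand > best:
--             best = cand
--     return None if best is None else best[1]
-- ===== Notes on version B (the rewrite author's own statement) =====
-- stated objective: simpler
-- what changed: B drops A's scored list, reverse-sort and head-indexing: it keeps a single running best (score, text) tuple during the one filtering pass and returns its text.
import Mathlib
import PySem

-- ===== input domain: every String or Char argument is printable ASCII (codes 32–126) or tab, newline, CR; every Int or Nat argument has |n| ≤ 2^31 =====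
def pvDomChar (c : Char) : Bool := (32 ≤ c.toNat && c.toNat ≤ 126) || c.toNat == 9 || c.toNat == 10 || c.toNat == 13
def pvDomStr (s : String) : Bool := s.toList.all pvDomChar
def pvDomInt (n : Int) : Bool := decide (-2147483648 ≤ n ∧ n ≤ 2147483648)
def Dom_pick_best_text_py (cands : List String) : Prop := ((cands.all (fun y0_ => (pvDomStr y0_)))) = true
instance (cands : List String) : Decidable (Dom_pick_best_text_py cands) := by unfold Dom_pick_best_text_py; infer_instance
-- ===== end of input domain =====

-- B replaces A's build-list + reverse-sort + take-head with a single pass keeping a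
-- running best (score, text) tuple (objective: simpler; same filtering and scoring).

-- ===== PORT A =====
-- module-level helpers shared by both Pythons (identical in Source A and Source B)

-- _BAD_EXACT (a Python set of distinct string literals; only membership is tested)
def pvBadExact : List String :=
  ["microsoft power bi", "power bi", "view report", "report",
   "dashboard", "sign in", "home", "sheet", "show filters",
   "navigating to visual", "use ctrl", "press ctrl", "press enter",
   "skip to report", "skip to main content"]

-- _BAD_SUBSTR
def pvBadSubstr : List String :=
  ["navigating to visual", "use ctrl", "press ctrl", "keyboard shortcut",
   "skip to report", "skip to main content", "aria-live"]

-- _non_generic(txt); '(txt or "")' is txt itself for strings (empty stays empty)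
def pvNonGeneric (txt : String) : Bool :=
  let low := PySem.Str.lower (PySem.Str.strip txt)
  if low = "" || pvBadExact.contains low then false
  else if pvBadSubstr.any (fun sub => PySem.Str.isIn sub low) then false
  else true

-- score = len(t) + (3 if " " in t else 0); scored element (score, t)
def pvScoreOf (t : String) : Int × String :=
  (PySem.Str.len t + (if PySem.Str.isIn " " t then 3 else 0), t)

-- loop body of A: skip falsy raw, strip, filter, append (score, t)
def pvAStep (acc : List (Int × String)) (raw : String) : List (Int × String) :=
  if raw = "" then acc
  else
    let t := PySem.Str.strip raw
    if !pvNonGeneric t then acc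
    else acc ++ [pvScoreOf t]

def pick_best_text_py (cands : List String) : Option String :=
  let scored := cands.foldl pvAStep []
  if scored = [] then none
  else
    -- scored.sort(reverse=True): Python sorts the (int, str) tuples lexicographically,
    -- which is exactly the ×ₗ (Prod.Lex) order; then scored[0][1]
    match PySem.List.sorted scored (fun p => toLex p) true with
    | [] => none
    | p :: _ => some p.2

-- ===== PORT B =====
-- Python's '>' on (int, str) tuples: lexicographic (exact for these pair values)
def pvPairGt (a b : Int × String) : Bool :=
  b.1 < a.1 || (a.1 == b.1 && b.2 < a.2)

-- loop body of B: same skip/filter, then update the running best tuple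
def pvBStep (best : Option (Int × String)) (raw : String) : Option (Int × String) :=
  if raw = "" then best
  else
    let t := PySem.Str.strip raw
    if !pvNonGeneric t then best
    else
      match best with
      | none => some (pvScoreOf t)
      | some q => if pvPairGt (pvScoreOf t) q then some (pvScoreOf t) else best

def pick_best_text_py_alt (cands : List String) : Option String :=
  (cands.foldl pvBStep none).map Prod.snd

-- ===== PRECONDITION & SPEC =====
def Spec_pick_best_text_py (cands : List String) (out : Option String) : Prop := out = pick_best_text_py_alt cands
instance (cands : List String) (out : Option String) : Decidable (Spec_pick_best_text_py cands out) := by unfold Spec_pick_best_text_py; infer_instance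

-- ===== CLAIM (what is proved, stated in full; the proofs are below) =====
def Claim_equal_pick_best_text_py : Prop := ∀ (cands : List String), Dom_pick_best_text_py cands → Spec_pick_best_text_py cands (pick_best_text_py cands)

-- ===== LEMMAS AND PROOFS =====

-- the "take the larger tuple" step B folds with, on already-filtered pairs
def pvMaxStep (b : Option (Int × String)) (p : Int × String) : Option (Int × String) :=
  match b with
  | none => some p
  | some q => if pvPairGt p q then some p else some q

theorem pvPairGt_iff (a b : Int × String) :
    pvPairGt a b = true ↔ toLex b < toLex a := by
  rw [Prod.Lex.toLex_lt_toLex]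
  simp only [pvPairGt, Bool.or_eq_true, Bool.and_eq_true, decide_eq_true_eq, beq_iff_eq]
  constructor
  · rintro (h | ⟨h1, h2⟩)
    · exact Or.inl h
    · exact Or.inr ⟨h1.symm, h2⟩
  · rintro (h | ⟨h1, h2⟩)
    · exact Or.inl h
    · exact Or.inr ⟨h1.symm, h2⟩

theorem pvBStep_eq (best : Option (Int × String)) (raw : String) :
    pvBStep best raw = (pvAStep [] raw).foldl pvMaxStep best := by
  unfold pvBStep pvAStep
  dsimp only
  split_ifs with h1 h2
  · rfl
  · rfl
  · cases best <;> rfl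

theorem pvAStep_append (acc : List (Int × String)) (raw : String) :
    pvAStep acc raw = acc ++ pvAStep [] raw := by
  unfold pvAStep
  dsimp only
  split_ifs <;> simp

theorem pvBuild_append (cands : List String) (acc : List (Int × String)) :
    cands.foldl pvAStep acc = acc ++ cands.foldl pvAStep [] := by
  induction cands generalizing acc with
  | nil => simp
  | cons raw rest ih =>
    simp only [List.foldl_cons]
    rw [ih (pvAStep acc raw), ih (pvAStep [] raw), pvAStep_append acc raw,
      List.append_assoc]

theorem pvFuse (cands : List String) (b : Option (Int × String)) :
    cands.foldl pvBStep b = (cands.foldl pvAStep []).foldl pvMaxStep b := by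
  induction cands generalizing b with
  | nil => simp
  | cons raw rest ih =>
    simp only [List.foldl_cons]
    rw [ih, pvBuild_append rest (pvAStep [] raw), List.foldl_append, pvBStep_eq]

theorem pvMaxFold_some (ys : List (Int × String)) (b : Int × String) :
    ∃ m, ys.foldl pvMaxStep (some b) = some m ∧ (m = b ∨ m ∈ ys) ∧
      toLex b ≤ toLex m ∧ ∀ y ∈ ys, toLex y ≤ toLex m := by
  induction ys generalizing b with
  | nil => exact ⟨b, rfl, Or.inl rfl, le_refl _, by simp⟩
  | cons y t ih =>
    by_cases h : pvPairGt y b = true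
    · obtain ⟨m, hm, hmem, hle, hall⟩ := ih y
      refine ⟨m, by simp [List.foldl_cons, pvMaxStep, h, hm], ?_, ?_, ?_⟩
      · rcases hmem with h' | h' <;> simp [h']
      · exact le_of_lt (lt_of_lt_of_le ((pvPairGt_iff y b).mp h) hle)
      · intro z hz
        rcases List.mem_cons.mp hz with h' | h'
        · exact h' ▸ hle
        · exact hall z h'
    · obtain ⟨m, hm, hmem, hle, hall⟩ := ih b
      refine ⟨m, by simp [List.foldl_cons, pvMaxStep, h, hm], ?_, hle, ?_⟩
      · rcases hmem with h' | h' <;> simp [h']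
      · intro z hz
        rcases List.mem_cons.mp hz with h' | h'
        · subst h'
          exact le_trans (le_of_not_gt (fun hlt => h ((pvPairGt_iff z b).mpr hlt))) hle
        · exact hall z h'

theorem pick_best_text_py_eq (cands : List String) :
    pick_best_text_py cands = pick_best_text_py_alt cands := by
  unfold pick_best_text_py pick_best_text_py_alt
  rw [pvFuse]
  cases hsc : cands.foldl pvAStep [] with
  | nil => simp
  | cons y t =>
    obtain ⟨m, hm, hmem, hley, hall⟩ := pvMaxFold_some t y
    have hall' : ∀ z ∈ y :: t, toLex z ≤ toLex m := by
      intro z hz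
      rcases List.mem_cons.mp hz with h | h
      · exact h ▸ hley
      · exact hall z h
    have hmmem : m ∈ y :: t := by
      rcases hmem with h | h
      · exact h ▸ List.mem_cons_self
      · exact List.mem_cons_of_mem y h
    simp only [List.foldl_cons, pvMaxStep, if_neg (List.cons_ne_nil y t)]
    rw [hm]
    cases hsort : PySem.List.sorted (y :: t) (fun p => toLex p) true with
    | nil => exact absurd hsort (by simp [PySem.List.sorted_eq_nil_iff])
    | cons p ps =>
      have hmax := PySem.List.key_head_sorted_rev_ge (y :: t) (fun p => toLex p) hsort
      have hpmem : p ∈ y :: t := by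
        have hp : p ∈ PySem.List.sorted (y :: t) (fun p => toLex p) true := by
          rw [hsort]; exact List.mem_cons_self
        exact (PySem.List.mem_sorted _ _ _ p).mp hp
      have heq : p = m := by
        have h1 : toLex p ≤ toLex m := hall' p hpmem
        have h2 : toLex m ≤ toLex p := hmax m hmmem
        exact toLex.injective (le_antisymm h1 h2)
      simp [heq]

-- ===== VERDICT (by name: the statement is the Claim_ definition above) =====
theorem pick_best_text_py_spec : Claim_equal_pick_best_text_py := by
  intro cands _
  unfold Spec_pick_best_text_py
  exact pick_best_text_py_eq cands
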